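-- pv_equiv track=rewrite | github.com/Eli-Zxh/Casio_like-calculater | latextest.py | find_matching_braces
-- ===== SOURCE A (Python) =====
-- def find_matching_braces(s, start, brace_type='{}'):
--     """匹配括号,s为字符串，start为起始位置，brace_type为括号类型，返回匹配的括号位置"""
--     if len(brace_type) != 2 or brace_type[0] not in '({[<' or brace_type[1] not in ')}]>':
--         raise ValueError(f"Invalid brace type: {brace_type}")
--     open_brace, close_brace = brace_type
--     stack = []
--     for i in range(start, len(s)):
--         if s[i] == open_brace:
--             stack.append(i)
--         elif s[i] == close_brace:
--             if not stack:
--                 return -1  # 提前发现不匹配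
--             stack.pop()
--             if not stack:
--                 return i+1 #返回匹配的括号位置，而非索引
--     return -1  # 明确返回-1表示未找到
-- ===== SOURCE B (Python) =====
-- def find_matching_braces(s, start, brace_type='{}'):
--     """匹配括号,s为字符串，start为起始位置，brace_type为括号类型，返回匹配的括号位置"""
--     if len(brace_type) != 2 or brace_type[0] not in '({[<' or brace_type[1] not in ')}]>':
--         raise ValueError(f"Invalid brace type: {brace_type}")
--     open_brace, close_brace = brace_type
--     # Stage 1: extract only the brace events (index, char) in scan order.
--     events = [(i, s[i]) for i in range(start, len(s))
--               if s[i] == open_brace or s[i] == close_brace]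
--     if not events or events[0][1] == close_brace:
--         return -1
--     # Stage 2: recursive descent on the nesting structure.
--     def skip(k):
--         # events[k:] lies inside one unmatched open brace; return the event
--         # index just past its matching close, or None if it never closes.
--         while k < len(events):
--             i, c = events[k]
--             if c == close_brace:
--                 return k + 1
--             k = skip(k + 1)       # skip a nested group
--             if k is None:
--                 return None
--         return None
--     r = skip(1)
--     return events[r - 1][0] + 1 if r is not None else -1
-- ===== Notes on version B (the rewrite author's own statement) =====
-- stated objective: alternative
-- what changed: Replaces A's single-pass stack scan by two stages: a comprehension first extracts just the brace events (index, char), then a recursive-descent matcher walks the events, recursing to skip each nested group, and returns the position just past the close that matches the first open.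
import Mathlib
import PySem

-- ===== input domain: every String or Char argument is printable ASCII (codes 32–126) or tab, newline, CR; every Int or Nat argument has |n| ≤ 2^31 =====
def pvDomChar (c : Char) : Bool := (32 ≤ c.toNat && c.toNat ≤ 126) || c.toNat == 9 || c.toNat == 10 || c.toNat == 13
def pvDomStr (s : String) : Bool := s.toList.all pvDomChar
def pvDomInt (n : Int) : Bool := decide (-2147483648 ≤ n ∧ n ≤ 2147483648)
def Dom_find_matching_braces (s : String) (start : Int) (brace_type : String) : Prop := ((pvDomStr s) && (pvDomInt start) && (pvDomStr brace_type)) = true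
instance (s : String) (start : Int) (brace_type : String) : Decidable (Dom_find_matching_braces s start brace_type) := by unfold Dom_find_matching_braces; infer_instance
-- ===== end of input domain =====

-- B replaces A's single-pass stack scan by two stages: extract the brace events, then a
-- recursive-descent matcher that skips nested groups by recursion on the nesting structure.


-- ===== PORT A =====
-- A's loop: state is the stack of open-brace indices; s[i] via pyGet? (none = IndexError,
-- excluded by Pre_; there the port returns 0, a value never claimed about).
def fmbLoopA (cs : List Char) (ob cb : Char) : List Int → List Int → Int
  | [], _ => -1
  | i :: rest, stack =>
    match PySem.List.pyGet? cs i with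
    | none => 0  -- IndexError; outside Pre_
    | some c =>
      if c = ob then fmbLoopA cs ob cb rest (stack ++ [i])       -- stack.append(i)
      else if c = cb then
        if stack = [] then -1
        else
          let stack' := stack.dropLast                            -- stack.pop() (value unused)
          if stack' = [] then i + 1 else fmbLoopA cs ob cb rest stack'
      else fmbLoopA cs ob cb rest stack

def find_matching_braces (s : String) (start : Int) (brace_type : String) : Int :=
  match brace_type.toList with
  | [ob, cb] =>
    if ob ∈ ['(', '{', '[', '<'] && cb ∈ [')', '}', ']', '>'] then
      fmbLoopA s.toList ob cb (PySem.List.pyRange start (s.toList.length : Int) 1) []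
    else 0  -- ValueError; outside Pre_
  | _ => 0  -- ValueError; outside Pre_

-- ===== PORT B =====
-- Stage 1 of Source B: the comprehension extracting brace events (index, char) in scan order.
def fmbEvents (cs : List Char) (ob cb : Char) (idxs : List Int) : List (Int × Char) :=
  idxs.filterMap (fun i =>
    (PySem.List.pyGet? cs i).bind (fun c => if c = ob || c = cb then some (i, c) else none))

-- Stage 2 of Source B: the recursive `skip`; the while loop + recursion is written with an
-- explicit fuel parameter (2*len+2 steps always suffice; fuel 0 never fires inside Pre_).
def fmbSkip (es : List (Int × Char)) (cb : Char) : Nat → Nat → Option Nat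
  | 0, _ => none
  | fuel+1, k =>
    if k < es.length then
      let c := (es.getD k (0, ' ')).2
      if c = cb then some (k + 1)
      else
        match fmbSkip es cb fuel (k + 1) with   -- skip a nested group
        | none => none
        | some k' => fmbSkip es cb fuel k'
    else none

def find_matching_braces_alt (s : String) (start : Int) (brace_type : String) : Int :=
  let bt := brace_type.toList
  if bt.length == 2 && ['(', '{', '[', '<'].contains (bt.getD 0 ' ')
      && [')', '}', ']', '>'].contains (bt.getD 1 ' ') then
    let cb := bt.getD 1 ' '
    let events := fmbEvents s.toList (bt.getD 0 ' ') cb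
      (PySem.List.pyRange start (s.toList.length : Int) 1)
    match events with
    | [] => -1
    | (_, c) :: _ =>
      if c = cb then -1
      else
        match fmbSkip events cb (2 * events.length + 2) 1 with
        | none => -1
        | some r => (events.getD (r - 1) (0, ' ')).1 + 1
  else 0  -- ValueError; outside Pre_

-- ===== PRECONDITION & SPEC =====
-- Pre_ excludes exactly the inputs where the Python raises: an invalid brace_type (ValueError)
-- and start < -len(s), where s[start] is an IndexError on the first iteration.
def Pre_find_matching_braces (s : String) (start : Int) (brace_type : String) : Prop :=
  brace_type.toList.length = 2 ∧
  brace_type.toList.getD 0 ' ' ∈ ['(', '{', '[', '<'] ∧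
  brace_type.toList.getD 1 ' ' ∈ [')', '}', ']', '>'] ∧
  -(s.toList.length : Int) ≤ start
instance (s : String) (start : Int) (brace_type : String) : Decidable (Pre_find_matching_braces s start brace_type) := by unfold Pre_find_matching_braces; infer_instance

def pvWitness_find_matching_braces : String × Int × String := ("a{b{c}d}e", 0, "{}")

def Spec_find_matching_braces (s : String) (start : Int) (brace_type : String) (out : Int) : Prop := out = find_matching_braces_alt s start brace_type
instance (s : String) (start : Int) (brace_type : String) (out : Int) : Decidable (Spec_find_matching_braces s start brace_type out) := by unfold Spec_find_matching_braces; infer_instance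

-- ===== CLAIM (what is proved, stated in full; the proofs are below) =====
def Claim_equal_find_matching_braces : Prop := ∀ (s : String) (start : Int) (brace_type : String), Dom_find_matching_braces s start brace_type → Pre_find_matching_braces s start brace_type → Spec_find_matching_braces s start brace_type (find_matching_braces s start brace_type)

-- ===== LEMMAS AND PROOFS =====

-- Proof-side intermediate form 1: A's loop with the stack replaced by its length (a depth).
def fmbLoopDepth (cs : List Char) (ob cb : Char) : List Int → Int → Int
  | [], _ => -1
  | i :: rest, depth =>
    match PySem.List.pyGet? cs i with
    | none => 0
    | some c =>
      if c = ob then fmbLoopDepth cs ob cb rest (depth + 1)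
      else if c = cb then
        if depth = 0 then -1
        else if depth - 1 = 0 then i + 1 else fmbLoopDepth cs ob cb rest (depth - 1)
      else fmbLoopDepth cs ob cb rest depth

-- Proof-side intermediate form 2: the depth loop run on the event list only.
def fmbLoopE (ob cb : Char) : List (Int × Char) → Int → Int
  | [], _ => -1
  | (i, c) :: rest, depth =>
    if c = ob then fmbLoopE ob cb rest (depth + 1)
    else if c = cb then
      if depth = 0 then -1
      else if depth - 1 = 0 then i + 1 else fmbLoopE ob cb rest (depth - 1)
    else fmbLoopE ob cb rest depth

-- A's stack loop equals the depth loop when depth = stack length.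
theorem fmbLoop_eq (cs : List Char) (ob cb : Char) :
    ∀ (idxs : List Int) (stack : List Int) (depth : Int),
      (stack.length : Int) = depth →
      fmbLoopA cs ob cb idxs stack = fmbLoopDepth cs ob cb idxs depth := by
  intro idxs
  induction idxs with
  | nil => intro stack depth h; simp [fmbLoopA, fmbLoopDepth]
  | cons i rest ih =>
    intro stack depth h
    simp only [fmbLoopA, fmbLoopDepth]
    cases hg : PySem.List.pyGet? cs i with
    | none => rfl
    | some c =>
      dsimp only
      by_cases hob : c = ob
      · rw [if_pos hob, if_pos hob]
        exact ih (stack ++ [i]) (depth + 1) (by simp [← h])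
      · by_cases hcb : c = cb
        · rw [if_neg hob, if_neg hob, if_pos hcb, if_pos hcb]
          have hempty : (stack = []) ↔ (depth = 0) := by
            constructor
            · intro he; subst he; simpa using h.symm
            · intro hd; subst hd
              cases stack with
              | nil => rfl
              | cons a t => simp at h; omega
          by_cases hs : stack = []
          · rw [if_pos hs, if_pos (hempty.mp hs)]
          · rw [if_neg hs, if_neg (fun hd => hs (hempty.mpr hd))]
            have hlen : ((stack.dropLast).length : Int) = depth - 1 := by
              have : stack.length ≠ 0 := fun h0 => hs (List.eq_nil_of_length_eq_zero h0)
              simp only [List.length_dropLast]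
              omega
            have hdrop : (stack.dropLast = []) ↔ (depth - 1 = 0) := by
              constructor
              · intro he; rw [he] at hlen; simpa using hlen.symm
              · intro hd
                have : (stack.dropLast).length = 0 := by omega
                exact List.eq_nil_of_length_eq_zero this
            by_cases hs' : stack.dropLast = []
            · rw [if_pos hs', if_pos (hdrop.mp hs')]
            · rw [if_neg hs', if_neg (fun hd => hs' (hdrop.mpr hd))]
              exact ih _ _ hlen
        · rw [if_neg hob, if_neg hob, if_neg hcb, if_neg hcb]
          exact ih stack depth h

-- Filtering: the depth loop over all indices equals the depth loop over the events only.
theorem fmbLoopDepth_eq_loopE (cs : List Char) (ob cb : Char) (hne : ob ≠ cb) :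
    ∀ (idxs : List Int) (d : Int),
      (∀ i ∈ idxs, (PySem.List.pyGet? cs i).isSome) →
      fmbLoopDepth cs ob cb idxs d = fmbLoopE ob cb (fmbEvents cs ob cb idxs) d := by
  intro idxs
  induction idxs with
  | nil => intro d _; simp [fmbLoopDepth, fmbEvents, fmbLoopE]
  | cons i rest ih =>
    intro d hsome
    obtain ⟨c, hc⟩ := Option.isSome_iff_exists.mp (hsome i (by simp))
    have hrest : ∀ j ∈ rest, (PySem.List.pyGet? cs j).isSome :=
      fun j hj => hsome j (by simp [hj])
    simp only [fmbLoopDepth, fmbEvents, List.filterMap_cons, hc, Option.bind_some]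
    by_cases hob : c = ob
    · subst hob
      have h1 := ih (d + 1) hrest
      simp only [fmbEvents] at h1
      simp [fmbLoopE, h1]
    · by_cases hcb : c = cb
      · subst hcb
        have h1 := ih (d - 1) hrest
        simp only [fmbEvents] at h1
        simp [fmbLoopE, hob, h1]
      · have h1 := ih d hrest
        simp only [fmbEvents] at h1
        simp [hob, hcb, h1]

-- fmbSkip's result bounds: it always advances and never passes the end.
theorem fmbSkip_bounds (es : List (Int × Char)) (cb : Char) :
    ∀ (fuel k r : Nat), fmbSkip es cb fuel k = some r → k + 1 ≤ r ∧ r ≤ es.length := by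
  intro fuel
  induction fuel with
  | zero => intro k r h; simp [fmbSkip] at h
  | succ fuel ih =>
    intro k r h
    simp only [fmbSkip] at h
    by_cases hk : k < es.length
    · rw [if_pos hk] at h
      by_cases hc : (es.getD k (0, ' ')).2 = cb
      · rw [if_pos hc] at h
        cases h; omega
      · rw [if_neg hc] at h
        cases h1 : fmbSkip es cb fuel (k + 1) with
        | none => rw [h1] at h; simp at h
        | some k' =>
          rw [h1] at h
          have b1 := ih (k + 1) k' h1
          have b2 := ih k' r h
          omega
    · rw [if_neg hk] at h; simp at h

-- fmbSkip is stable once the fuel is at least 2*(len-k)+1.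
theorem fmbSkip_stable (es : List (Int × Char)) (cb : Char) :
    ∀ (f1 f2 k : Nat), 2 * (es.length - k) + 1 ≤ f1 → 2 * (es.length - k) + 1 ≤ f2 →
      fmbSkip es cb f1 k = fmbSkip es cb f2 k := by
  intro f1
  induction f1 with
  | zero => intro f2 k h1 _; omega
  | succ g1 ih =>
    intro f2 k h1 h2
    obtain ⟨g2, rfl⟩ : ∃ g2, f2 = g2 + 1 := ⟨f2 - 1, by omega⟩
    simp only [fmbSkip]
    by_cases hk : k < es.length
    · rw [if_pos hk, if_pos hk]
      by_cases hc : (es.getD k (0, ' ')).2 = cb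
      · rw [if_pos hc, if_pos hc]
      · rw [if_neg hc, if_neg hc]
        have hinner : fmbSkip es cb g1 (k + 1) = fmbSkip es cb g2 (k + 1) :=
          ih g2 (k + 1) (by omega) (by omega)
        rw [hinner]
        cases h1' : fmbSkip es cb g2 (k + 1) with
        | none => rfl
        | some k' =>
          have hb := fmbSkip_bounds es cb g2 (k + 1) k' h1'
          exact ih g2 k' (by omega) (by omega)
    · rw [if_neg hk, if_neg hk]

-- Main correspondence: the depth loop over a suffix of the events equals interpreting fmbSkip.
theorem loopE_eq_skip (es : List (Int × Char)) (ob cb : Char) (hne : ob ≠ cb)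
    (hch : ∀ p ∈ es, p.2 = ob ∨ p.2 = cb) :
    ∀ (n k : Nat) (d : Int), es.length - k = n → 1 ≤ d →
      fmbLoopE ob cb (es.drop k) d =
        (match fmbSkip es cb (2 * (es.length - k) + 1) k with
         | none => -1
         | some r => if d = 1 then (es.getD (r - 1) (0, ' ')).1 + 1
                     else fmbLoopE ob cb (es.drop r) (d - 1)) := by
  intro n
  induction n using Nat.strong_induction_on with
  | _ n ihn =>
    intro k d hn hd
    by_cases hk : k < es.length
    · have hdrop : es.drop k = es[k] :: es.drop (k + 1) := List.drop_eq_getElem_cons hk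
      have hgetD : es.getD k (0, ' ') = es[k] := List.getD_eq_getElem es (0, ' ') hk
      rcases hek : es[k] with ⟨i, c⟩
      have hc2 : (es.getD k (0, ' ')).2 = c := by rw [hgetD, hek]
      have hmem : (i, c) ∈ es := hek ▸ List.getElem_mem hk
      rw [hdrop, hek]
      rcases hch _ hmem with hcob | hccb
      · -- open brace: recurse into the nested group
        replace hcob : c = ob := hcob
        have hcne : ¬ ((es.getD k (0, ' ')).2 = cb) := by rw [hc2, hcob]; exact hne
        have hskip : fmbSkip es cb (2 * (es.length - k) + 1) k =
            (match fmbSkip es cb (2 * (es.length - k)) (k + 1) with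
             | none => none
             | some k' => fmbSkip es cb (2 * (es.length - k)) k') := by
          simp only [fmbSkip]
          rw [if_pos hk, if_neg hcne]
        have hlhs : fmbLoopE ob cb ((i, c) :: es.drop (k + 1)) d =
            fmbLoopE ob cb (es.drop (k + 1)) (d + 1) := by
          simp [fmbLoopE, hcob]
        have hIH1 := ihn (es.length - (k + 1)) (by omega) (k + 1) (d + 1) rfl (by omega)
        have hst1 : fmbSkip es cb (2 * (es.length - k)) (k + 1) =
            fmbSkip es cb (2 * (es.length - (k + 1)) + 1) (k + 1) :=
          fmbSkip_stable es cb _ _ (k + 1) (by omega) (by omega)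
        rw [hlhs, hIH1, hskip, hst1]
        cases hres : fmbSkip es cb (2 * (es.length - (k + 1)) + 1) (k + 1) with
        | none => rfl
        | some k' =>
          have hb := fmbSkip_bounds es cb _ _ _ hres
          have hd1 : ¬ (d + 1 = 1) := by omega
          dsimp only
          rw [if_neg hd1]
          have hst2 : fmbSkip es cb (2 * (es.length - k)) k' =
              fmbSkip es cb (2 * (es.length - k') + 1) k' :=
            fmbSkip_stable es cb _ _ k' (by omega) (by omega)
          have hIH2 := ihn (es.length - k') (by omega) k' d rfl hd
          have : d + 1 - 1 = d := by omega
          rw [this, hIH2, hst2]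
      · -- close brace: the match is found (or passed up one level)
        replace hccb : c = cb := hccb
        have hcob : ¬ (c = ob) := fun h => hne (h.symm.trans hccb)
        have hceq : (es.getD k (0, ' ')).2 = cb := by rw [hc2, hccb]
        have hskip : fmbSkip es cb (2 * (es.length - k) + 1) k = some (k + 1) := by
          simp only [fmbSkip]; rw [if_pos hk, if_pos hceq]
        rw [hskip]
        simp only [fmbLoopE]
        rw [if_neg hcob, if_pos hccb, if_neg (by omega : ¬ d = 0)]
        by_cases hd1 : d = 1
        · rw [if_pos (by omega : d - 1 = 0), if_pos hd1]
          have : k + 1 - 1 = k := by omega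
          rw [this, hgetD, hek]
        · rw [if_neg (by omega : ¬ d - 1 = 0), if_neg hd1]
    · have h1 : es.drop k = [] := List.drop_eq_nil_of_le (by omega)
      have h2 : fmbSkip es cb (2 * (es.length - k) + 1) k = none := by
        simp only [fmbSkip]; rw [if_neg hk]
      rw [h1, h2]; simp [fmbLoopE]

-- Event characters are always the open or close brace.
theorem fmbEvents_chars (cs : List Char) (ob cb : Char) (idxs : List Int) :
    ∀ p ∈ fmbEvents cs ob cb idxs, p.2 = ob ∨ p.2 = cb := by
  intro p hp
  simp only [fmbEvents, List.mem_filterMap] at hp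
  obtain ⟨i, _, hi⟩ := hp
  cases hg : PySem.List.pyGet? cs i with
  | none => rw [hg] at hi; simp at hi
  | some c =>
    rw [hg] at hi
    simp only [Option.bind_some] at hi
    by_cases h : (c = ob || c = cb) = true
    · rw [if_pos h] at hi
      cases hi
      simpa using h
    · rw [if_neg h] at hi; simp at hi

-- ===== VERDICT (by name: the statement is the Claim_ definition above) =====
theorem find_matching_braces_spec : Claim_equal_find_matching_braces := by
  intro s start brace_type _ hpre
  obtain ⟨hlen, ha, hb, hstart⟩ := hpre
  obtain ⟨ob, cb, hbt⟩ := List.length_eq_two.mp hlen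
  rw [hbt] at ha hb
  simp only [List.getD_cons_zero, List.getD_cons_succ] at ha hb
  have hne : ob ≠ cb := by
    simp only [List.mem_cons, List.not_mem_nil, or_false] at ha hb
    rcases ha with rfl|rfl|rfl|rfl <;> rcases hb with rfl|rfl|rfl|rfl <;> decide
  have hsome : ∀ i ∈ PySem.List.pyRange start (s.toList.length : Int) 1,
      (PySem.List.pyGet? s.toList i).isSome := by
    intro i hi
    rw [PySem.List.mem_pyRange_one] at hi
    rw [Option.isSome_iff_ne_none]
    intro hnone
    rw [PySem.List.pyGet?_eq_none_iff] at hnone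
    exact hnone (by simp only [PySem.Raise.InRange]; omega)
  have hchars := fmbEvents_chars s.toList ob cb (PySem.List.pyRange start (s.toList.length : Int) 1)
  have hA : fmbLoopA s.toList ob cb (PySem.List.pyRange start (s.toList.length : Int) 1) [] =
      fmbLoopE ob cb (fmbEvents s.toList ob cb (PySem.List.pyRange start (s.toList.length : Int) 1)) 0 := by
    rw [fmbLoop_eq s.toList ob cb _ [] 0 (by simp)]
    exact fmbLoopDepth_eq_loopE s.toList ob cb hne _ 0 hsome
  have hc1 : (ob ∈ ['(', '{', '[', '<'] && cb ∈ [')', '}', ']', '>']) = true := by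
    simp [ha, hb]
  have hc2 : (([ob, cb].length == 2) && (['(', '{', '[', '<'].contains ([ob, cb].getD 0 ' '))
      && ([')', '}', ']', '>'].contains ([ob, cb].getD 1 ' '))) = true := by
    simp [ha, hb]
  unfold Spec_find_matching_braces find_matching_braces find_matching_braces_alt
  rw [hbt]
  dsimp only
  rw [if_pos hc1, if_pos hc2]
  simp only [List.getD_cons_zero, List.getD_cons_succ]
  rw [hA]
  cases hev : fmbEvents s.toList ob cb (PySem.List.pyRange start (s.toList.length : Int) 1) with
  | nil => simp [fmbLoopE]
  | cons p rest =>
    rcases p with ⟨i, c⟩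
    have hcmem : c = ob ∨ c = cb := hchars (i, c) (hev ▸ List.mem_cons_self ..)
    rcases hcmem with hco | hcc
    · -- first event is an open brace: depth becomes 1 and fmbSkip takes over
      have hcne : ¬ (c = cb) := fun h => hne (hco.symm.trans h)
      have hch2 : ∀ p ∈ (i, c) :: rest, p.2 = ob ∨ p.2 = cb := hev ▸ hchars
      have hmain := loopE_eq_skip ((i, c) :: rest) ob cb hne hch2
        (((i, c) :: rest).length - 1) 1 1 rfl le_rfl
      simp only [fmbLoopE]
      rw [if_pos hco, if_neg hcne, (by norm_num : (0 : Int) + 1 = 1)]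
      simp only [List.drop_succ_cons, List.drop_zero] at hmain
      rw [hmain]
      have hstb : fmbSkip ((i, c) :: rest) cb (2 * (((i, c) :: rest).length - 1) + 1) 1 =
          fmbSkip ((i, c) :: rest) cb (2 * ((i, c) :: rest).length + 2) 1 :=
        fmbSkip_stable _ _ _ _ 1 (by simp) (by simp; omega)
      rw [hstb]
      cases fmbSkip ((i, c) :: rest) cb (2 * ((i, c) :: rest).length + 2) 1 with
      | none => rfl
      | some r => simp
    · -- first event is a close brace: both sides return -1
      simp [fmbLoopE, hcc, Ne.symm hne]
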